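-- pv_equiv track=rewrite | github.com/ThejanB/Project-Euler | 085 method 2.py | calc
-- ===== SOURCE A (Python) =====
-- from itertools import product,combinations_with_replacement
--
-- def calc(limit):
--     nearest = (0,0,0,100000,0)              #(x,y,x*y,abs(),rectangles)
--     grid_range = 80
--     for x in range(1,grid_range):          # better to get range from 1 to grid_range
--         for y in range(x,grid_range+1):
--             rectangles = 0
--             size = (i for i in product(range(1,max(x,y)+1), repeat=2) if i[0]<x+1 and i[1]<y+1)
--
--             for item in size:
--                 rectangles += ( x-(item[0]-1) )*( y-(item[1]-1) )
--
--             if abs(limit - rectangles) < nearest[3] :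
--                 nearest = (x,y,x*y,abs(limit - rectangles),rectangles)
--
--             if rectangles > limit: # for next y , answers must be so far from this abs()
--                 if x == y:
--                     return nearest
--                 break
--     return nearest
-- ===== SOURCE B (Python) =====
-- def calc(limit):
--     def tri(n):
--         return n * (n + 1) // 2
--
--     cands = []
--     for x in range(1, 80):
--         tx = tri(x)
--         # first s in [x, 80] with tx*tri(s) > limit, or 81 if none
--         s = x
--         while s <= 80 and tx * tri(s) <= limit:
--             s += 1
--         if s > 80:
--             y = 80                       # no crossing: closest scanned count is at y = 80
--         elif s == x:
--             y = x                        # the very first y already exceeds the limit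
--         else:
--             below = limit - tx * tri(s - 1)
--             above = tx * tri(s) - limit
--             y = s - 1 if below <= above else s
--         rect = tx * tri(y)
--         cands.append((abs(limit - rect), x, y, rect))
--         if s == x:                       # x == y and rect > limit: the search stops here
--             break
--     best = (100000, 0, 0, 0)
--     for c in cands:
--         if c[0] < best[0]:
--             best = c
--     a, x, y, rect = best
--     return (x, y, x * y, a, rect)
-- ===== Notes on version B (the rewrite author's own statement) =====
-- stated objective: faster
-- what changed: B replaces A's whole nested scan: the O(x*y) sub-rectangle enumeration becomes the closed form tri(x)*tri(y), the inner y-scan with its running 'nearest' update becomes a search for the first y where the count crosses the limit followed by a comparison of just the two candidates around the crossing, and the winner is picked by a separate first-minimum pass over one candidate per x.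
import Mathlib
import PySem

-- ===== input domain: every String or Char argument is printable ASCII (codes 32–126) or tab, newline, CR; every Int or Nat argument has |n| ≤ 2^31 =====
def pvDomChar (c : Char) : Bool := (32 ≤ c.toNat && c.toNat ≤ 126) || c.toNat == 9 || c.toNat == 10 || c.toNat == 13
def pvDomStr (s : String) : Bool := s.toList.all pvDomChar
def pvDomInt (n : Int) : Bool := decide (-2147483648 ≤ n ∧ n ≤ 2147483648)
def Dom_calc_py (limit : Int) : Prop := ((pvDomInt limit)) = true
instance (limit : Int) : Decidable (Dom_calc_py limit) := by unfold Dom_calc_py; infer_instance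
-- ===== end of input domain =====

-- B replaces A's nested scan (inner O(x·y) sub-rectangle enumeration, sequential nearest
-- update with break/early-return) by: closed form tri(x)·tri(y), a search for the first y
-- where the count crosses the limit, a choice between the two candidates around the
-- crossing, and a separate first-minimum pass over one candidate per x.

-- ===== PORT A =====

-- rectangles: sum over the filtered product generator, exactly as in A's inner loops
def pvRectA (x y : Int) : Int :=
  (((PySem.List.pyRange 1 (max x y + 1) 1).flatMap
        (fun i => (PySem.List.pyRange 1 (max x y + 1) 1).map (fun j => (i, j)))).filter
      (fun p => decide (p.1 < x + 1) && decide (p.2 < y + 1))).foldl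
    (fun acc p => acc + (x - (p.1 - 1)) * (y - (p.2 - 1))) 0

-- inner 'for y' loop; Bool = an early 'return' happened (True) vs plain 'break'/loop end (False)
def pvLoopYA (limit x : Int) :
    List Int → (Int × Int × Int × Int × Int) → ((Int × Int × Int × Int × Int) × Bool)
  | [], n => (n, false)
  | y :: ys, n =>
    let rect := pvRectA x y
    let n' := if |limit - rect| < n.2.2.2.1 then (x, y, x * y, |limit - rect|, rect) else n
    if rect > limit then
      (if x = y then (n', true) else (n', false))
    else pvLoopYA limit x ys n'

-- outer 'for x' loop
def pvLoopXA (limit : Int) :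
    List Int → (Int × Int × Int × Int × Int) → (Int × Int × Int × Int × Int)
  | [], n => n
  | x :: xs, n =>
    match pvLoopYA limit x (PySem.List.pyRange x 81 1) n with
    | (n', true) => n'
    | (n', false) => pvLoopXA limit xs n'

def calc_py (limit : Int) : List Int :=
  let n := pvLoopXA limit (PySem.List.pyRange 1 80 1) (0, 0, 0, 100000, 0)
  [n.1, n.2.1, n.2.2.1, n.2.2.2.1, n.2.2.2.2]

-- ===== PORT B =====

def pvTriB (n : Int) : Int := PySem.Int.floordiv (n * (n + 1)) 2

-- the 'while s <= 80 and tx*tri(s) <= limit: s += 1' loop of Source B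
def pvFindStop (limit tx : Int) (s : Int) : Int :=
  if h : s ≤ 80 ∧ tx * pvTriB s ≤ limit then pvFindStop limit tx (s + 1) else s
termination_by (81 - s).toNat
decreasing_by omega

-- one x of Source B's loop: (candidate appended, whether the loop breaks here)
def pvBlockB (limit x : Int) : (Int × Int × Int × Int) × Bool :=
  let tx := pvTriB x
  let s := pvFindStop limit tx x
  let y := if s > 80 then 80
           else if s = x then x
           else if limit - tx * pvTriB (s - 1) ≤ tx * pvTriB s - limit then s - 1 else s
  let rect := tx * pvTriB y
  ((|limit - rect|, x, y, rect), decide (s = x))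

-- Source B's 'for x' loop building cands (break truncates the list)
def pvCandsB (limit : Int) : List Int → List (Int × Int × Int × Int)
  | [] => []
  | x :: xs =>
    match pvBlockB limit x with
    | (c, true) => [c]
    | (c, false) => c :: pvCandsB limit xs

def calc_py_alt (limit : Int) : List Int :=
  let best := (pvCandsB limit (PySem.List.pyRange 1 80 1)).foldl
      (fun b c => if c.1 < b.1 then c else b) (100000, 0, 0, 0)
  [best.2.1, best.2.2.1, best.2.1 * best.2.2.1, best.1, best.2.2.2]

-- ===== PRECONDITION & SPEC =====
def Spec_calc_py (limit : Int) (out : List Int) : Prop := out = calc_py_alt limit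
instance (limit : Int) (out : List Int) : Decidable (Spec_calc_py limit out) := by unfold Spec_calc_py; infer_instance

-- ===== CLAIM (what is proved, stated in full; the proofs are below) =====
def Claim_equal_calc_py : Prop := ∀ (limit : Int), Dom_calc_py limit → Spec_calc_py limit (calc_py limit)

-- ===== LEMMAS AND PROOFS =====

-- A's nearest update, B's candidate update, and the embedding between their tuple shapes
def pvUpd5 (n c : Int × Int × Int × Int × Int) : Int × Int × Int × Int × Int :=
  if c.2.2.2.1 < n.2.2.2.1 then c else n

def pvE (c : Int × Int × Int × Int) : Int × Int × Int × Int × Int :=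
  (c.2.1, c.2.2.1, c.2.1 * c.2.2.1, c.1, c.2.2.2)

def pvCandP (limit x y : Int) : Int × Int × Int × Int :=
  (|limit - pvTriB x * pvTriB y|, x, y, pvTriB x * pvTriB y)

def pvPick (limit x s : Int) : Int × Int × Int × Int :=
  if (pvCandP limit x (s - 1)).1 ≤ (pvCandP limit x s).1
  then pvCandP limit x (s - 1) else pvCandP limit x s

-- what A's inner loop yields for the tail segment starting at y (stated via B's pieces)
def pvSegRes (limit x y : Int) (n : Int × Int × Int × Int × Int) :
    (Int × Int × Int × Int × Int) × Bool :=
  let s := pvFindStop limit (pvTriB x) y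
  if s = 81 then (pvUpd5 n (pvE (pvCandP limit x 80)), false)
  else if s = y then (pvUpd5 n (pvE (pvCandP limit x y)), decide (x = y))
  else (pvUpd5 n (pvE (pvPick limit x s)), false)

-- ---- closed form for A's rectangle count (sum factorises, Gauss) ----

theorem pv_sum_map_range_int (f : Nat → Int) (n : Nat) :
    ((List.range n).map f).sum = ∑ k ∈ Finset.range n, f k := by
  induction n with
  | zero => simp
  | succ n ih => simp [List.range_succ, Finset.sum_range_succ, ih]

theorem pv_gauss (n : Nat) :
    (∑ k ∈ Finset.range n, ((n : Int) - k)) = (n * (n + 1)) / 2 := by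
  induction n with
  | zero => simp
  | succ n ih =>
    have h : ∀ k ∈ Finset.range n, (((n : Nat) + 1 : Nat) : Int) - (k : Nat) = ((n : Int) - k) + 1 := by
      intro k _; push_cast; ring
    rw [Finset.sum_range_succ, Finset.sum_congr rfl h, Finset.sum_add_distrib, ih]
    have hev : (2 : Int) ∣ (n : Int) * ((n : Int) + 1) := (Int.even_mul_succ_self (n : Int)).two_dvd
    obtain ⟨c, hc⟩ := hev
    have hc2 : ((n : Int) + 1) * ((n : Int) + 1 + 1) = 2 * c + 2 * ((n : Int) + 1) := by
      rw [← hc]; ring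
    push_cast
    rw [hc, hc2]
    simp
    omega

theorem pv_sum_mul_left (c : Int) (f : Int → Int) (l : List Int) :
    (l.map (fun j => c * f j)).sum = c * (l.map f).sum := by
  induction l with
  | nil => simp
  | cons j l ih => simp [ih, mul_add]

theorem pv_prod_sum (x y : Int) (R S : List Int) :
    (((R.flatMap fun i => S.map fun j => ((i : Int), j)).filter
        (fun p => decide (p.1 < x + 1) && decide (p.2 < y + 1))).map
      (fun p => (x - (p.1 - 1)) * (y - (p.2 - 1)))).sum
    = ((R.filter fun i => decide (i < x + 1)).map fun i => x - (i - 1)).sum *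
      ((S.filter fun j => decide (j < y + 1)).map fun j => y - (j - 1)).sum := by
  induction R with
  | nil => simp
  | cons i R ih =>
    rw [List.flatMap_cons, List.filter_append, List.map_append, List.sum_append, ih,
      List.filter_cons]
    by_cases hi : i < x + 1
    · simp only [List.filter_map, Function.comp_def, List.map_map, hi, decide_true,
        Bool.true_and, if_true]
      have : (fun j => (fun p : Int × Int => (x - (p.1 - 1)) * (y - (p.2 - 1))) (i, j))
          = fun j : Int => (x - (i - 1)) * (y - (j - 1)) := rfl
      rw [this, pv_sum_mul_left (x - (i - 1)) (fun j => y - (j - 1)), List.map_cons,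
        List.sum_cons]
      ring
    · have hfalse : (fun j : Int => decide (i < x + 1) && decide (j < y + 1))
          = fun _ => false := by funext j; simp [hi]
      simp only [List.filter_map, Function.comp_def, hfalse, List.filter_false,
        List.map_nil, List.sum_nil, zero_add]
      rw [if_neg (by simp [hi])]

theorem pv_filter_range (a b : Int) (ha : 0 ≤ a) (hab : a ≤ b) :
    (PySem.List.pyRange 1 (b + 1) 1).filter (fun i => decide (i < a + 1))
      = PySem.List.pyRange 1 (a + 1) 1 := by
  rw [PySem.List.pyRange_one_append 1 (a + 1) (b + 1) (by omega) (by omega), List.filter_append]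
  have h1 : (PySem.List.pyRange 1 (a + 1) 1).filter (fun i => decide (i < a + 1))
      = PySem.List.pyRange 1 (a + 1) 1 := by
    apply List.filter_eq_self.mpr
    intro i hi
    have := (PySem.List.mem_pyRange_one.1 hi).2
    simpa using this
  have h2 : (PySem.List.pyRange (a + 1) (b + 1) 1).filter (fun i => decide (i < a + 1)) = [] := by
    apply List.filter_eq_nil_iff.mpr
    intro i hi
    have := (PySem.List.mem_pyRange_one.1 hi).1
    simp
    omega
  rw [h1, h2, List.append_nil]

theorem pv_tri_sum (a : Int) (ha : 0 ≤ a) :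
    ((PySem.List.pyRange 1 (a + 1) 1).map (fun i => a - (i - 1))).sum
      = PySem.Int.floordiv (a * (a + 1)) 2 := by
  rw [PySem.List.pyRange_one, List.map_map, show ((a + 1) - 1).toNat = a.toNat from by omega,
    pv_sum_map_range_int, PySem.Int.floordiv_eq_ediv_of_pos (by norm_num)]
  have hcast : (a.toNat : Int) = a := Int.toNat_of_nonneg ha
  have hsum : ∀ k ∈ Finset.range a.toNat,
      ((fun i => a - (i - 1)) ∘ fun k : Nat => (1 : Int) + k) k = ((a.toNat : Int) - k) := by
    intro k _; simp [Function.comp, hcast]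
  rw [Finset.sum_congr rfl hsum, pv_gauss, hcast]

theorem pv_rect_eq (x y : Int) (hx : 1 ≤ x) (hxy : x ≤ y) :
    pvRectA x y = pvTriB x * pvTriB y := by
  unfold pvRectA pvTriB
  rw [max_eq_right hxy, PySem.List.foldl_add, zero_add, pv_prod_sum,
    pv_filter_range x y (by omega) hxy, pv_filter_range y y (by omega) le_rfl,
    pv_tri_sum x (by omega), pv_tri_sum y (by omega)]

-- ---- arithmetic of tri ----

theorem pv_two_tri (n : Int) : 2 * pvTriB n = n * (n + 1) := by
  unfold pvTriB
  rw [PySem.Int.floordiv_eq_ediv_of_pos (by norm_num)]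
  exact Int.mul_ediv_cancel' (Int.even_mul_succ_self n).two_dvd

theorem pv_tri_mono (a b : Int) (ha : 0 ≤ a) (hab : a < b) : pvTriB a < pvTriB b := by
  have h1 := pv_two_tri a
  have h2 := pv_two_tri b
  nlinarith

theorem pv_tri_pos (x : Int) (hx : 1 ≤ x) : 1 ≤ pvTriB x := by
  have h := pv_two_tri x
  nlinarith

theorem pv_rect_mono (x a b : Int) (hx : 1 ≤ x) (ha : 0 ≤ a) (hab : a < b) :
    pvTriB x * pvTriB a < pvTriB x * pvTriB b :=
  mul_lt_mul_of_pos_left (pv_tri_mono a b ha hab) (by linarith [pv_tri_pos x hx])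

-- ---- pvFindStop specification ----

theorem pv_findStop_unfold (limit tx s : Int) :
    pvFindStop limit tx s =
      if s ≤ 80 ∧ tx * pvTriB s ≤ limit then pvFindStop limit tx (s + 1) else s := by
  rw [pvFindStop]
  split <;> simp_all

theorem pv_findStop_ge (limit tx : Int) :
    ∀ (k : Nat) (s : Int), (81 - s).toNat = k → s ≤ pvFindStop limit tx s := by
  intro k
  induction k with
  | zero =>
    intro s hk
    rw [pv_findStop_unfold]
    split
    · omega
    · exact le_refl s
  | succ k ih =>
    intro s hk
    rw [pv_findStop_unfold]
    split
    · rename_i h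
      have := ih (s + 1) (by omega)
      omega
    · exact le_refl s

theorem pv_findStop_le (limit tx : Int) :
    ∀ (k : Nat) (s : Int), (81 - s).toNat = k → s ≤ 81 → pvFindStop limit tx s ≤ 81 := by
  intro k
  induction k with
  | zero =>
    intro s hk hs
    rw [pv_findStop_unfold]
    split
    · omega
    · exact hs
  | succ k ih =>
    intro s hk hs
    rw [pv_findStop_unfold]
    split
    · rename_i h
      exact ih (s + 1) (by omega) (by omega)
    · exact hs

theorem pv_findStop_cross (limit tx : Int) :
    ∀ (k : Nat) (s : Int), (81 - s).toNat = k →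
      pvFindStop limit tx s ≤ 80 → limit < tx * pvTriB (pvFindStop limit tx s) := by
  intro k
  induction k with
  | zero =>
    intro s hk hle
    rw [pv_findStop_unfold] at hle ⊢
    by_cases h : s ≤ 80 ∧ tx * pvTriB s ≤ limit
    · exact absurd h.1 (by omega)
    · rw [if_neg h] at hle ⊢
      exact not_le.mp (not_and.mp h hle)
  | succ k ih =>
    intro s hk hle
    rw [pv_findStop_unfold] at hle ⊢
    by_cases h : s ≤ 80 ∧ tx * pvTriB s ≤ limit
    · rw [if_pos h] at hle ⊢
      exact ih (s + 1) (by omega) hle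
    · rw [if_neg h] at hle ⊢
      exact not_le.mp (not_and.mp h hle)

theorem pv_findStop_below (limit tx : Int) :
    ∀ (k : Nat) (s : Int), (81 - s).toNat = k →
      ∀ z, s ≤ z → z < pvFindStop limit tx s → tx * pvTriB z ≤ limit := by
  intro k
  induction k with
  | zero =>
    intro s hk z hz1 hz2
    rw [pv_findStop_unfold] at hz2
    split at hz2
    · omega
    · omega
  | succ k ih =>
    intro s hk z hz1 hz2
    rw [pv_findStop_unfold] at hz2
    split at hz2
    · rename_i h
      by_cases hzs : z = s
      · rw [hzs]; exact h.2
      · exact ih (s + 1) (by omega) z (by omega) hz2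
    · omega

-- ---- fold-collapse lemmas for the nearest update ----

theorem pv_upd5_drop (n d p : Int × Int × Int × Int × Int)
    (h : p.2.2.2.1 < d.2.2.2.1) : pvUpd5 (pvUpd5 n d) p = pvUpd5 n p := by
  unfold pvUpd5
  split_ifs <;> first | rfl | omega

theorem pv_upd5_pair (n d p : Int × Int × Int × Int × Int) :
    pvUpd5 (pvUpd5 n d) p = pvUpd5 n (if d.2.2.2.1 ≤ p.2.2.2.1 then d else p) := by
  unfold pvUpd5
  split_ifs <;> first | rfl | omega

theorem pv_E_abs (c : Int × Int × Int × Int) : (pvE c).2.2.2.1 = c.1 := rfl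

-- ---- the inner loop computes pvSegRes ----

theorem pv_seg (limit x : Int) (hx : 1 ≤ x) :
    ∀ (k : Nat) (y : Int) (n : Int × Int × Int × Int × Int),
      (80 - y).toNat = k → x ≤ y → y ≤ 80 →
      pvLoopYA limit x (PySem.List.pyRange y 81 1) n = pvSegRes limit x y n := by
  intro k
  induction k with
  | zero =>
    intro y n hk hxy hy80
    have hy : y = 80 := by omega
    subst hy
    rw [show (81 : Int) = 80 + 1 from rfl, PySem.List.pyRange_one_singleton]
    rw [pvLoopYA, pvLoopYA, pv_rect_eq x 80 hx hxy]
    unfold pvSegRes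
    by_cases hcross : pvTriB x * pvTriB 80 > limit
    · have hs : pvFindStop limit (pvTriB x) 80 = 80 := by
        rw [pv_findStop_unfold]; split <;> omega
      rw [hs]
      simp only [if_neg (by omega : ¬(80 : Int) = 81)]
      rw [if_pos hcross]
      by_cases hx80 : x = 80
      · simp [hx80, pvUpd5, pvE, pvCandP]
      · simp [hx80, pvUpd5, pvE, pvCandP]
    · have hs : pvFindStop limit (pvTriB x) 80 = 81 := by
        rw [pv_findStop_unfold, if_pos ⟨le_refl _, by omega⟩, pv_findStop_unfold]
        split <;> omega
      rw [hs, if_pos rfl, if_neg hcross]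
      simp [pvUpd5, pvE, pvCandP]
  | succ k ih =>
    intro y n hk hxy hy80
    rw [PySem.List.pyRange_one_cons (by omega : y < 81), pvLoopYA, pv_rect_eq x y hx hxy]
    unfold pvSegRes
    by_cases hcross : pvTriB x * pvTriB y > limit
    · have hs : pvFindStop limit (pvTriB x) y = y := by
        rw [pv_findStop_unfold]; split <;> omega
      rw [hs]
      simp only [if_neg (by omega : ¬y = 81)]
      rw [if_pos hcross]
      by_cases hxy' : x = y
      · simp [hxy', pvUpd5, pvE, pvCandP]
      · simp [hxy', pvUpd5, pvE, pvCandP]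
    · have hstep : pvFindStop limit (pvTriB x) y = pvFindStop limit (pvTriB x) (y + 1) := by
        rw [pv_findStop_unfold, if_pos ⟨by omega, by omega⟩]
      rw [if_neg hcross, ih (y + 1) _ (by omega) (by omega) (by omega)]
      unfold pvSegRes
      rw [← hstep]
      set s := pvFindStop limit (pvTriB x) y with hsdef
      have hsge : y + 1 ≤ s := by
        have := pv_findStop_ge limit (pvTriB x) (81 - (y + 1)).toNat (y + 1) rfl
        omega
      have hsle : s ≤ 81 := pv_findStop_le limit (pvTriB x) (81 - y).toNat y rfl (by omega)
      have hbelow : ∀ z, y ≤ z → z < s → pvTriB x * pvTriB z ≤ limit :=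
        pv_findStop_below limit (pvTriB x) (81 - y).toNat y rfl
      -- n' written as an update
      have hn' : (if |limit - pvTriB x * pvTriB y| < n.2.2.2.1
            then (x, y, x * y, |limit - pvTriB x * pvTriB y|, pvTriB x * pvTriB y) else n)
          = pvUpd5 n (pvE (pvCandP limit x y)) := by
        simp [pvUpd5, pvE, pvCandP]
      rw [hn']
      have habs_y : (pvCandP limit x y).1 = limit - pvTriB x * pvTriB y := by
        simp [pvCandP]; omega
      by_cases hs81 : s = 81
      · rw [if_pos hs81, if_pos hs81]
        congr 1
        apply pv_upd5_drop
        rw [pv_E_abs, pv_E_abs, habs_y]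
        have h80 : (pvCandP limit x 80).1 = limit - pvTriB x * pvTriB 80 := by
          have := hbelow 80 (by omega) (by omega)
          simp [pvCandP]; omega
        rw [h80]
        have := pv_rect_mono x y 80 hx (by omega) (by omega)
        omega
      · rw [if_neg hs81, if_neg hs81, if_neg (by omega : ¬s = y)]
        by_cases hsy1 : s = y + 1
        · rw [if_pos hsy1]
          simp only [Prod.mk.injEq]
          refine ⟨?_, decide_eq_false_iff_not.mpr (by omega)⟩
          rw [pv_upd5_pair]
          congr 1
          unfold pvPick
          rw [hsy1, show y + 1 - 1 = y from by omega]
          rw [apply_ite pvE, pv_E_abs, pv_E_abs]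
        · rw [if_neg hsy1]
          congr 1
          apply pv_upd5_drop
          rw [pv_E_abs, pv_E_abs, habs_y]
          have hs80 : s ≤ 80 := by omega
          have habs_s1 : (pvCandP limit x (s - 1)).1 = limit - pvTriB x * pvTriB (s - 1) := by
            have hb := hbelow (s - 1) (by omega) (by omega)
            simp only [pvCandP]
            rw [abs_of_nonneg (by linarith)]
          have hmono := pv_rect_mono x y (s - 1) hx (by omega) (by omega)
          have hpick : (pvPick limit x s).1 ≤ (pvCandP limit x (s - 1)).1 := by
            unfold pvPick; split_ifs with h
            · exact le_refl _
            · omega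
          omega

-- ---- one block: A's inner loop equals B's block candidate ----

theorem pv_block (limit x : Int) (n : Int × Int × Int × Int × Int)
    (hx : 1 ≤ x) (hx80 : x ≤ 80) :
    pvLoopYA limit x (PySem.List.pyRange x 81 1) n
      = (pvUpd5 n (pvE (pvBlockB limit x).1), (pvBlockB limit x).2) := by
  rw [pv_seg limit x hx (80 - x).toNat x n rfl (le_refl x) hx80]
  simp only [pvSegRes, pvBlockB, gt_iff_lt]
  generalize hS : pvFindStop limit (pvTriB x) x = S
  have hsge : x ≤ S := hS ▸ pv_findStop_ge limit (pvTriB x) (81 - x).toNat x rfl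
  have hsle : S ≤ 81 := hS ▸ pv_findStop_le limit (pvTriB x) (81 - x).toNat x rfl (by omega)
  have hcross : S ≤ 80 → limit < pvTriB x * pvTriB S :=
    hS ▸ pv_findStop_cross limit (pvTriB x) (81 - x).toNat x rfl
  have hbelow : ∀ z, x ≤ z → z < S → pvTriB x * pvTriB z ≤ limit :=
    fun z h1 h2 => pv_findStop_below limit (pvTriB x) (81 - x).toNat x rfl z h1 (hS ▸ h2)
  by_cases hs81 : S = 81
  · subst hs81
    simp [show (80 : Int) < 81 from by norm_num, show ¬(81 : Int) = x from by omega, pvCandP]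
  · by_cases hsx : S = x
    · subst hsx
      simp [show ¬S = 81 from hs81, show ¬(80 : Int) < S from by omega, pvCandP]
    · have hs80 : S ≤ 80 := by omega
      have habs1 : (pvCandP limit x (S - 1)).1 = limit - pvTriB x * pvTriB (S - 1) := by
        have h1 := hbelow (S - 1) (by omega) (by omega)
        simp only [pvCandP]
        rw [abs_of_nonneg (by linarith)]
      have habs2 : (pvCandP limit x S).1 = pvTriB x * pvTriB S - limit := by
        have h2 := hcross hs80
        simp only [pvCandP]
        rw [abs_of_nonpos (by linarith), neg_sub]
      simp only [pvPick]
      rw [habs1, habs2]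
      by_cases hch : limit - pvTriB x * pvTriB (S - 1) ≤ pvTriB x * pvTriB S - limit
      · simp [hs81, hsx, show ¬(80 : Int) < S from by omega, hch, pvCandP]
      · simp [hs81, hsx, show ¬(80 : Int) < S from by omega, hch, pvCandP]

-- ---- outer loop vs candidate list ----

theorem pv_outer (limit : Int) :
    ∀ (xs : List Int) (n : Int × Int × Int × Int × Int),
      (∀ z ∈ xs, 1 ≤ z ∧ z ≤ 80) →
      pvLoopXA limit xs n
        = (pvCandsB limit xs).foldl (fun m c => pvUpd5 m (pvE c)) n := by
  intro xs
  induction xs with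
  | nil => intro n _; rfl
  | cons x xs ih =>
    intro n hmem
    obtain ⟨hx1, hx80⟩ := hmem x (List.mem_cons_self ..)
    rw [pvLoopXA, pvCandsB, pv_block limit x n hx1 hx80]
    cases hb : pvBlockB limit x with
    | mk c flag =>
      cases flag
      · simp only []
        exact ih _ (fun z hz => hmem z (List.mem_cons_of_mem _ hz))
      · rfl

-- ---- the embedding commutes with the final first-minimum fold ----

theorem pv_fold_e (cs : List (Int × Int × Int × Int)) :
    ∀ (b : Int × Int × Int × Int),
      cs.foldl (fun m c => pvUpd5 m (pvE c)) (pvE b)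
        = pvE (cs.foldl (fun b c => if c.1 < b.1 then c else b) b) := by
  induction cs with
  | nil => intro b; rfl
  | cons c cs ih =>
    intro b
    have hstep : pvUpd5 (pvE b) (pvE c) = pvE (if c.1 < b.1 then c else b) := by
      unfold pvUpd5
      rw [pv_E_abs, pv_E_abs, apply_ite pvE]
    rw [List.foldl_cons, List.foldl_cons, hstep, ih]

-- ===== VERDICT (by name: the statement is the Claim_ definition above) =====
theorem calc_py_spec : Claim_equal_calc_py := by
  intro limit _
  unfold Spec_calc_py calc_py calc_py_alt
  rw [pv_outer limit _ _ (by
    intro z hz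
    have := PySem.List.mem_pyRange_one.1 hz
    omega)]
  rw [show ((0 : Int), (0 : Int), (0 : Int), (100000 : Int), (0 : Int))
      = pvE (100000, 0, 0, 0) from by norm_num [pvE], pv_fold_e]
  simp [pvE]
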